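-- pv_equiv track=rewrite | github.com/pranesh-S-S/AI-Adaptive-Onboarding-Engine | AI-Adaptive-Onboarding-Engine/backend/adaptive.py | cluster_skills
-- ===== SOURCE A (Python) =====
-- from collections import defaultdict
--
-- SKILL_CLUSTERS = {
--     "Frontend"          : ["React", "HTML", "CSS", "JavaScript", "TypeScript",
--                            "Vue.js", "Next.js", "Angular", "Tailwind CSS",
--                            "Bootstrap", "Redux", "Webpack"],
--     "Backend"           : ["Node.js", "Django", "Flask", "FastAPI", "Express",
--                            "Spring Boot", "REST APIs", "GraphQL", "PHP",
--                            "Ruby on Rails", "Java", "Go", "Rust"],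
--     "Database"          : ["SQL", "PostgreSQL", "MongoDB", "MySQL", "Redis",
--                            "SQLite", "Cassandra", "Firebase", "Elasticsearch"],
--     "Machine Learning"  : ["Machine Learning", "Deep Learning", "TensorFlow",
--                            "PyTorch", "Scikit-learn", "Keras", "NLP",
--                            "Computer Vision", "Pandas", "NumPy",
--                            "Artificial Intelligence", "Data Analysis"],
--     "DevOps & Cloud"    : ["Docker", "Kubernetes", "AWS", "GCP", "Azure",
--                            "CI/CD", "Jenkins", "Terraform", "Linux",
--                            "Amazon Web Services", "Google Cloud Platform"],
--     "Programming"       : ["Python", "Java", "C++", "C#", "JavaScript",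
--                            "TypeScript", "Go", "Rust", "Kotlin", "Swift",
--                            "R", "Scala", "MATLAB"],
--     "Data Engineering"  : ["Spark", "Hadoop", "Kafka", "Airflow", "ETL",
--                            "Data Pipelines", "BigQuery", "Snowflake",
--                            "Data Warehousing"],
--     "Mobile"            : ["Flutter", "React Native", "iOS", "Android",
--                            "Swift", "Kotlin", "Xamarin"],
--     "Tools & Practices" : ["Git", "GitHub", "Agile", "Scrum", "JIRA",
--                            "Unit Testing", "TDD", "REST APIs",
--                            "Object Oriented Programming",
--                            "Data Structures and Algorithms"]
-- }
--
-- def cluster_skills(skills: list) -> dict: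
--     clustered   = defaultdict(list)
--     unclustered = []
--     for skill in skills:
--         skill_lower = skill.lower()
--         placed      = False
--         for cluster, cluster_skills_list in SKILL_CLUSTERS.items():
--             for cs in cluster_skills_list:
--                 if skill_lower == cs.lower() or skill_lower in cs.lower():
--                     clustered[cluster].append(skill)
--                     placed = True
--                     break
--             if placed:
--                 break
--         if not placed:
--             unclustered.append(skill)
--     if unclustered:
--         clustered["Other"] = unclustered
--     return dict(clustered)
-- ===== SOURCE B (Python) =====
-- from collections import defaultdict
--
-- SKILL_CLUSTERS = {
--     "Frontend"          : ["React", "HTML", "CSS", "JavaScript", "TypeScript",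
--                            "Vue.js", "Next.js", "Angular", "Tailwind CSS",
--                            "Bootstrap", "Redux", "Webpack"],
--     "Backend"           : ["Node.js", "Django", "Flask", "FastAPI", "Express",
--                            "Spring Boot", "REST APIs", "GraphQL", "PHP",
--                            "Ruby on Rails", "Java", "Go", "Rust"],
--     "Database"          : ["SQL", "PostgreSQL", "MongoDB", "MySQL", "Redis",
--                            "SQLite", "Cassandra", "Firebase", "Elasticsearch"],
--     "Machine Learning"  : ["Machine Learning", "Deep Learning", "TensorFlow",
--                            "PyTorch", "Scikit-learn", "Keras", "NLP",
--                            "Computer Vision", "Pandas", "NumPy",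
--                            "Artificial Intelligence", "Data Analysis"],
--     "DevOps & Cloud"    : ["Docker", "Kubernetes", "AWS", "GCP", "Azure",
--                            "CI/CD", "Jenkins", "Terraform", "Linux",
--                            "Amazon Web Services", "Google Cloud Platform"],
--     "Programming"       : ["Python", "Java", "C++", "C#", "JavaScript",
--                            "TypeScript", "Go", "Rust", "Kotlin", "Swift",
--                            "R", "Scala", "MATLAB"],
--     "Data Engineering"  : ["Spark", "Hadoop", "Kafka", "Airflow", "ETL",
--                            "Data Pipelines", "BigQuery", "Snowflake",
--                            "Data Warehousing"],
--     "Mobile"            : ["Flutter", "React Native", "iOS", "Android",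
--                            "Swift", "Kotlin", "Xamarin"],
--     "Tools & Practices" : ["Git", "GitHub", "Agile", "Scrum", "JIRA",
--                            "Unit Testing", "TDD", "REST APIs",
--                            "Object Oriented Programming",
--                            "Data Structures and Algorithms"]
-- }
--
-- # Flat lookup table, lowered once at import time: (cluster, lowered catalogue skill).
-- _FLAT = [(cluster, cs.lower())
--          for cluster, lst in SKILL_CLUSTERS.items() for cs in lst]
--
--
-- def _cluster_of(skill):
--     sl = skill.lower()
--     return next((c for c, cl in _FLAT if sl in cl), None)
--
--
-- def cluster_skills(skills: list) -> dict:
--     labels = [_cluster_of(s) for s in skills]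
--     order = list(dict.fromkeys(l for l in labels if l is not None))
--     out = {c: [s for s, l in zip(skills, labels) if l == c] for c in order}
--     other = [s for s, l in zip(skills, labels) if l is None]
--     if other:
--         out["Other"] = other
--     return out
-- ===== Notes on version B (the rewrite author's own statement) =====
-- stated objective: alternative
-- what changed: Replaces A's per-skill nested cluster/catalogue scan with placed-flag and defaultdict mutation by a map-then-group pipeline: a flat lowered lookup table built once at import, a single classification pass producing a label per skill, then grouping by comprehensions in first-occurrence key order.
import Mathlib
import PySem

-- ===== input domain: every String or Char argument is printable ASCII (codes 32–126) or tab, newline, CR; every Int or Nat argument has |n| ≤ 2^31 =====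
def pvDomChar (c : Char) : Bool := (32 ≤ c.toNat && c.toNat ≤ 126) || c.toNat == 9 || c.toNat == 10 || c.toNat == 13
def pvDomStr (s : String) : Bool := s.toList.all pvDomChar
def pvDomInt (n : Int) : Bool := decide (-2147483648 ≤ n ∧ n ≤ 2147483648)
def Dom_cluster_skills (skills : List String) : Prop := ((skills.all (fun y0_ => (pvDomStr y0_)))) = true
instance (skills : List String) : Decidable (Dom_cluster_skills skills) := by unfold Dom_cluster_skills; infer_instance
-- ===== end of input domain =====

-- B replaces A's per-skill nested catalogue scan (placed flag, defaultdict mutation) by a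
-- map-then-group pipeline over a flat lowered lookup table built once; same return value, alternative decomposition.

-- ===== PORT A =====
-- module constant SKILL_CLUSTERS (shared context of both implementations)
def skillClusters : List (String × List String) :=
  [("Frontend", ["React", "HTML", "CSS", "JavaScript", "TypeScript", "Vue.js", "Next.js",
                 "Angular", "Tailwind CSS", "Bootstrap", "Redux", "Webpack"]),
   ("Backend", ["Node.js", "Django", "Flask", "FastAPI", "Express", "Spring Boot",
                "REST APIs", "GraphQL", "PHP", "Ruby on Rails", "Java", "Go", "Rust"]),
   ("Database", ["SQL", "PostgreSQL", "MongoDB", "MySQL", "Redis", "SQLite", "Cassandra",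
                 "Firebase", "Elasticsearch"]),
   ("Machine Learning", ["Machine Learning", "Deep Learning", "TensorFlow", "PyTorch",
                         "Scikit-learn", "Keras", "NLP", "Computer Vision", "Pandas",
                         "NumPy", "Artificial Intelligence", "Data Analysis"]),
   ("DevOps & Cloud", ["Docker", "Kubernetes", "AWS", "GCP", "Azure", "CI/CD", "Jenkins",
                       "Terraform", "Linux", "Amazon Web Services", "Google Cloud Platform"]),
   ("Programming", ["Python", "Java", "C++", "C#", "JavaScript", "TypeScript", "Go", "Rust",
                    "Kotlin", "Swift", "R", "Scala", "MATLAB"]),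
   ("Data Engineering", ["Spark", "Hadoop", "Kafka", "Airflow", "ETL", "Data Pipelines",
                         "BigQuery", "Snowflake", "Data Warehousing"]),
   ("Mobile", ["Flutter", "React Native", "iOS", "Android", "Swift", "Kotlin", "Xamarin"]),
   ("Tools & Practices", ["Git", "GitHub", "Agile", "Scrum", "JIRA", "Unit Testing", "TDD",
                          "REST APIs", "Object Oriented Programming",
                          "Data Structures and Algorithms"])]

-- A's inner 'for cs in cluster_skills_list: if …: …; break' — true at the first matching cs
def aScan (sl : String) : List String → Bool
  | [] => false
  | cs :: rest =>
      if sl == PySem.Str.lower cs || PySem.Str.isIn sl (PySem.Str.lower cs) then true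
      else aScan sl rest

-- A's middle 'for cluster, cluster_skills_list in SKILL_CLUSTERS.items(): … if placed: break'
def aFind (sl : String) : List (String × List String) → Option String
  | [] => none
  | (c, lst) :: rest => if aScan sl lst then some c else aFind sl rest

def cluster_skills (skills : List String) : List (String × List String) :=
  let st := skills.foldl
    (fun (st : PySem.Dict String (List String) × List String) skill =>
      match aFind (PySem.Str.lower skill) skillClusters with
      | some c => (st.1.modify c [] (fun v => v ++ [skill]), st.2)   -- clustered[cluster].append(skill)
      | none => (st.1, st.2 ++ [skill]))                             -- unclustered.append(skill)
    ((PySem.Dict.empty : PySem.Dict String (List String)), ([] : List String))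
  let d := if st.2 ≠ [] then st.1.insert "Other" st.2 else st.1      -- if unclustered: clustered["Other"] = unclustered
  d.items

-- ===== PORT B =====
-- _FLAT: flat lowered table built once at import
def flatTable : List (String × String) :=
  skillClusters.flatMap (fun p => p.2.map (fun cs => (p.1, PySem.Str.lower cs)))

-- _cluster_of: first table entry whose lowered catalogue string contains the lowered skill
def clusterOf (skill : String) : Option String :=
  flatTable.findSome? (fun p =>
    if PySem.Str.isIn (PySem.Str.lower skill) p.2 then some p.1 else none)

def cluster_skills_alt (skills : List String) : List (String × List String) :=
  let labels := skills.map clusterOf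
  let order := PySem.List.dedup (labels.filterMap (fun l => l))
  let out := order.map (fun c =>
    (c, ((skills.zip labels).filter (fun p => p.2 == some c)).map (fun p => p.1)))
  let other := ((skills.zip labels).filter (fun p => p.2 == none)).map (fun p => p.1)
  if other = [] then out else out ++ [("Other", other)]

-- ===== PRECONDITION & SPEC =====
def Spec_cluster_skills (skills : List String) (out : List (String × List String)) : Prop := out = cluster_skills_alt skills
instance (skills : List String) (out : List (String × List String)) : Decidable (Spec_cluster_skills skills out) := by unfold Spec_cluster_skills; infer_instance

-- ===== CLAIM (what is proved, stated in full; the proofs are below) =====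
def Claim_equal_cluster_skills : Prop := ∀ (skills : List String), Dom_cluster_skills skills → Spec_cluster_skills skills (cluster_skills skills)

-- ===== LEMMAS AND PROOFS =====

-- 'sl == t or sl in t' collapses to 'sl in t' (equality is substring containment)
lemma beq_or_isIn (a b : String) :
    (a == b || PySem.Str.isIn a b) = PySem.Str.isIn a b := by
  cases h : a == b
  · rw [Bool.false_or]
  · have hab : a = b := eq_of_beq h
    subst hab
    have ht : PySem.Str.isIn a a = true := by
      rw [PySem.Str.isIn_iff_infix]
    rw [ht, Bool.true_or]

-- A's nested first-match search equals the first match over the flattened lowered table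
lemma aFind_eq_flat (cl : List (String × List String)) (sl : String) :
    aFind sl cl
      = (cl.flatMap (fun p => p.2.map (fun cs => (p.1, PySem.Str.lower cs)))).findSome?
          (fun p => if PySem.Str.isIn sl p.2 then some p.1 else none) := by
  induction cl with
  | nil => rfl
  | cons hd rest ih =>
      obtain ⟨c, lst⟩ := hd
      simp only [List.flatMap_cons, List.findSome?_append]
      rw [← ih]
      have hscan : (lst.map (fun cs => (c, PySem.Str.lower cs))).findSome?
          (fun p => if PySem.Str.isIn sl p.2 then some p.1 else none)
          = if aScan sl lst then some c else none := by
        induction lst with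
        | nil => rfl
        | cons cs t iht =>
            simp only [List.map_cons, List.findSome?_cons, aScan, beq_or_isIn]
            cases h : PySem.Str.isIn sl (PySem.Str.lower cs)
            · simp only [Bool.false_eq_true, if_false]
              simpa using iht
            · simp
      rw [hscan, aFind]
      cases haScan : aScan sl lst <;> simp

lemma aFind_eq_clusterOf (s : String) :
    aFind (PySem.Str.lower s) skillClusters = clusterOf s := by
  rw [aFind_eq_flat]; rfl

-- the classification loop splits into the matched fold and the unmatched filter
lemma fold_split (g : String → Option String) :
    ∀ (skills : List String) (d : PySem.Dict String (List String)) (u : List String),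
      skills.foldl
        (fun (st : PySem.Dict String (List String) × List String) skill =>
          match g skill with
          | some c => (st.1.modify c [] (fun v => v ++ [skill]), st.2)
          | none => (st.1, st.2 ++ [skill])) (d, u)
      = ((skills.filterMap (fun s => (g s).map (fun c => (c, s)))).foldl
           (fun d p => d.modify p.1 [] (fun v => v ++ [p.2])) d,
         u ++ skills.filter (fun s => g s == none)) := by
  intro skills
  induction skills with
  | nil => intro d u; simp
  | cons s t ih =>
      intro d u
      cases h : g s with
      | some c => simp [List.foldl_cons, h, ih]
      | none => simp [List.foldl_cons, h, ih]

-- zip-with-labels filters, expressed over skills directly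
lemma zip_some (g : String → Option String) (c : String) :
    ∀ (skills : List String),
      ((skills.zip (skills.map g)).filter (fun p => p.2 == some c)).map (fun p => p.1)
        = ((skills.filterMap (fun s => (g s).map (fun c' => (c', s)))).filter
             (fun p => p.1 == c)).map (fun p => p.2) := by
  intro skills
  induction skills with
  | nil => rfl
  | cons s t ih =>
      cases h : g s with
      | some c' =>
          by_cases hc : c' = c <;> simp [h, ih, hc]
      | none => simp [h, ih]

lemma zip_none (g : String → Option String) :
    ∀ (skills : List String),
      ((skills.zip (skills.map g)).filter (fun p => p.2 == none)).map (fun p => p.1)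
        = skills.filter (fun s => g s == none) := by
  intro skills
  induction skills with
  | nil => rfl
  | cons s t ih =>
      cases h : g s
      · simp only [List.map_cons, List.zip_cons_cons, List.filter_cons, h]
        simpa using ih
      · simp only [List.map_cons, List.zip_cons_cons, List.filter_cons, h]
        simpa using ih

-- any value produced by the table search is a catalogue cluster name, never "Other"
lemma findSome?_mem_fst {α β : Type} (q : α × β → Bool) :
    ∀ (t : List (α × β)) (c : α),
      t.findSome? (fun p => if q p then some p.1 else none) = some c → c ∈ t.map (fun p => p.1) := by
  intro t
  induction t with
  | nil => intro c h; simp at h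
  | cons p rest ih =>
      intro c h
      simp only [List.findSome?_cons] at h
      by_cases hq : q p = true
      · simp [hq] at h; simp [← h]
      · simp [hq] at h; simp [ih c h]

lemma clusterOf_ne_other (s c : String) (h : clusterOf s = some c) : c ≠ "Other" := by
  have hm := findSome?_mem_fst _ flatTable c h
  intro hc; subst hc
  revert hm
  decide

lemma filterMap_fst (g : String → Option String) (skills : List String) :
    (skills.filterMap (fun s => (g s).map (fun c => (c, s)))).map (fun p => p.1)
      = skills.filterMap g := by
  rw [List.map_filterMap]
  congr 1
  funext s
  cases g s <;> rfl

theorem cluster_skills_spec_aux (skills : List String) :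
    cluster_skills skills = cluster_skills_alt skills := by
  unfold cluster_skills cluster_skills_alt
  simp only [aFind_eq_clusterOf]
  rw [fold_split clusterOf skills PySem.Dict.empty []]
  simp only [List.nil_append]
  set l := skills.filterMap (fun s => (clusterOf s).map (fun c => (c, s))) with hl
  set dd := l.foldl (fun d p => d.modify p.1 [] (fun v => v ++ [p.2])) (PySem.Dict.empty : PySem.Dict String (List String)) with hdd
  -- keys of the accumulated dict
  have hkeys : dd.keys = PySem.Set.ofList (skills.filterMap clusterOf) := by
    rw [hdd]
    rw [PySem.Dict.keys_foldl_modify_key l (fun p => p.1) [] (fun _ p _ => _) PySem.Dict.empty]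
    rw [PySem.Dict.keys_empty]
    rw [hl, filterMap_fst]
    rfl
  have hnodup : dd.keys.Nodup := by
    rw [hkeys]; exact PySem.Set.nodup_ofList _
  -- items of the accumulated dict
  have hitems : dd.items
      = (PySem.Set.ofList (skills.filterMap clusterOf)).map
          (fun c => (c, (l.filter (fun p => p.1 == c)).map (fun p => p.2))) := by
    rw [PySem.Dict.items_eq_map_keys dd hnodup [], hkeys]
    congr 1
    funext c
    rw [hdd, PySem.Dict.getD_foldl_modify_append l PySem.Dict.empty c]
    simp
  -- "Other" is not a key of the accumulated dict
  have hnc : dd.contains "Other" = false := by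
    cases h : dd.contains "Other"
    · rfl
    · exfalso
      have hmem := (PySem.Dict.contains_iff_mem_keys dd "Other").mp h
      rw [hkeys] at hmem
      have : "Other" ∈ skills.filterMap clusterOf := (PySem.Set.mem_ofList _ _).mp hmem
      obtain ⟨s, _, hs⟩ := List.mem_filterMap.mp this
      exact clusterOf_ne_other s "Other" hs rfl
  -- the right-hand side pieces
  have horder : PySem.List.dedup ((skills.map clusterOf).filterMap (fun x => x))
      = PySem.Set.ofList (skills.filterMap clusterOf) := by
    rw [PySem.List.dedup_eq_ofList, List.filterMap_map]
    rfl
  have hvals : ∀ c : String,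
      ((skills.zip (skills.map clusterOf)).filter (fun p => p.2 == some c)).map (fun p => p.1)
        = (l.filter (fun p => p.1 == c)).map (fun p => p.2) := by
    intro c; rw [hl]; exact zip_some clusterOf c skills
  have hother : ((skills.zip (skills.map clusterOf)).filter (fun p => p.2 == none)).map (fun p => p.1)
      = skills.filter (fun s => clusterOf s == none) := zip_none clusterOf skills
  simp only [horder, hother]
  by_cases hu : skills.filter (fun s => clusterOf s == none) = []
  · rw [hu, if_neg (fun hh => hh rfl), if_pos rfl, hitems]
    congr 1
    funext c
    rw [hvals c]
  · rw [if_pos hu, if_neg hu, PySem.Dict.items_insert_of_not_contains dd _ hnc, hitems]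
    congr 1
    congr 1
    funext c
    rw [hvals c]

-- ===== VERDICT (by name: the statement is the Claim_ definition above) =====
theorem cluster_skills_spec : Claim_equal_cluster_skills := by
  intro skills _
  exact cluster_skills_spec_aux skills
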